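-- pv_equiv track=rewrite | github.com/BernardYuan/CMPT441ProjectH | src/util.py | divide_MSA_by_segment
-- ===== SOURCE A (Python) =====
-- def divide_MSA_by_segment(msa, segLength) :
-- 	msa_by_seg = {}
-- 	segID = 0
-- 	colBase = 0
--
-- 	for seglen in segLength :
-- 		msaSeg = []
-- 		for i in range(seglen) :
-- 			colIdx = colBase + i;
-- 			segCol = []
-- 			for seq in msa :
-- 				segCol.append(seq[colIdx]);
-- 			msaSeg.append(segCol)
--
-- 		colBase = colBase + seglen
-- 		msa_by_seg[segID] = msaSeg
-- 		segID = segID + 1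
--
-- 	return msa_by_seg
-- ===== SOURCE B (Python) =====
-- def divide_MSA_by_segment(msa, segLength):
--     # Row-major decomposition: cut each sequence into per-segment chunks by slicing,
--     # then transpose each chunk's rows into columns; empty segments need no chunk.
--     starts = []
--     s = 0
--     for l in segLength:
--         starts.append(s)
--         s += l
--     out = {}
--     for segID, (start, seglen) in enumerate(zip(starts, segLength)):
--         if seglen > 0:
--             rows = [seq[start:start + seglen] for seq in msa]
--             out[segID] = [[row[i] for row in rows] for i in range(seglen)]
--         else:
--             out[segID] = []
--     return out
-- ===== Notes on version B (the rewrite author's own statement) =====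
-- stated objective: alternative
-- what changed: B works row-major: it precomputes segment start offsets, slices every sequence into per-segment row chunks, and transposes each chunk into columns, instead of A's column-major triple nested loop that reads one character per sequence per column.
-- outside the precondition, e.g. on divide_MSA_by_segment([['a', 'b']], [-1, 2]): A returns {0: [], 1: [['b'], ['a']]}, B raises IndexError
import Mathlib
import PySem

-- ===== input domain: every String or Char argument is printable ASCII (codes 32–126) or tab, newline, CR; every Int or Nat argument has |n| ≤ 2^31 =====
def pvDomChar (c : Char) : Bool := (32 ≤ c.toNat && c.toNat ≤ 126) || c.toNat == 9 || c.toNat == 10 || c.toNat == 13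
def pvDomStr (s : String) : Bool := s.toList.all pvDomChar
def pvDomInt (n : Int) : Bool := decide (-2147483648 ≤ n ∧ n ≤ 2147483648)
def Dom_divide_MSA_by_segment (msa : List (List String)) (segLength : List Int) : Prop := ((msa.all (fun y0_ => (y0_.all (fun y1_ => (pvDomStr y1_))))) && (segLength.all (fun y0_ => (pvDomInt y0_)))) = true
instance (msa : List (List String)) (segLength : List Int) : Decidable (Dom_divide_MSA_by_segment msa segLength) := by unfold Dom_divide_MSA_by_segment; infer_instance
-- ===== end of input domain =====

-- B is row-major: it precomputes segment start offsets, slices each sequence into per-segment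
-- row chunks (skipping empty segments), and transposes each chunk into columns; A's triple loop is column-major.


-- ===== PORT A =====
-- seq[colIdx] is ported with pyGetD "" ; out-of-range access (Python IndexError) is excluded by Pre_.
def divide_MSA_by_segment (msa : List (List String)) (segLength : List Int) : List (Int × List (List String)) :=
  (segLength.foldl
    (fun (st : PySem.Dict Int (List (List String)) × Int × Int) seglen =>
      let msaSeg := (PySem.List.pyRange 0 seglen 1).foldl
        (fun msaSeg i =>
          let colIdx := st.2.2 + i
          let segCol := msa.foldl (fun segCol seq => segCol ++ [PySem.List.pyGetD seq colIdx ""]) []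
          msaSeg ++ [segCol])
        []
      (st.1.insert st.2.1 msaSeg, st.2.1 + 1, st.2.2 + seglen))
    (PySem.Dict.empty, 0, 0)).1.items

-- ===== PORT B =====
-- row[i] is ported with pyGetD "" ; out-of-range access (Python IndexError) is excluded by Pre_.
def divide_MSA_by_segment_alt (msa : List (List String)) (segLength : List Int) : List (Int × List (List String)) :=
  let starts := (segLength.foldl (fun (st : List Int × Int) l => (st.1 ++ [st.2], st.2 + l)) ([], 0)).1
  ((PySem.List.enumerate (starts.zip segLength) 0).foldl
    (fun (out : PySem.Dict Int (List (List String))) p =>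
      if 0 < p.2.2 then
        let rows := msa.map (fun seq => PySem.List.slice seq (some p.2.1) (some (p.2.1 + p.2.2)))
        out.insert p.1 ((PySem.List.pyRange 0 p.2.2 1).map (fun i => rows.map (fun row => PySem.List.pyGetD row i "")))
      else out.insert p.1 [])
    PySem.Dict.empty).items

-- ===== PRECONDITION & SPEC =====
-- Pre_ excludes inputs (with at least one sequence) where some positive segment's column window
-- [offset, offset+len) starts below 0 or overruns some sequence: there A raises IndexError, or reads
-- columns through Python negative-index wraparound caused by leftover colBase after nonsensical
-- negative segment lengths — an accident B does not mimic.  An empty msa is always admitted.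
def Pre_divide_MSA_by_segment (msa : List (List String)) (segLength : List Int) : Prop :=
  msa = [] ∨
  (∀ j, (h : j < segLength.length) → 0 < segLength[j] →
    0 ≤ (segLength.take j).sum ∧
    ∀ seq ∈ msa, (segLength.take j).sum + segLength[j] ≤ (seq.length : Int))
instance (msa : List (List String)) (segLength : List Int) : Decidable (Pre_divide_MSA_by_segment msa segLength) := by unfold Pre_divide_MSA_by_segment; infer_instance

def pvWitness_divide_MSA_by_segment : List (List String) × List Int := ([["a", "b"], ["c", "d"]], [1, 1])

def Spec_divide_MSA_by_segment (msa : List (List String)) (segLength : List Int) (out : List (Int × List (List String))) : Prop := out = divide_MSA_by_segment_alt msa segLength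
instance (msa : List (List String)) (segLength : List Int) (out : List (Int × List (List String))) : Decidable (Spec_divide_MSA_by_segment msa segLength out) := by unfold Spec_divide_MSA_by_segment; infer_instance

-- ===== CLAIM =====
def Claim_equal_divide_MSA_by_segment : Prop := ∀ (msa : List (List String)) (segLength : List Int), Dom_divide_MSA_by_segment msa segLength → Pre_divide_MSA_by_segment msa segLength → Spec_divide_MSA_by_segment msa segLength (divide_MSA_by_segment msa segLength)

-- ===== LEMMAS AND PROOFS =====

-- the prefix-sum start offsets B's first loop computes, starting from b
def prefStarts : List Int → Int → List Int
  | [], _ => []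
  | l :: t, b => b :: prefStarts t (b + l)

lemma startsFold (segs : List Int) : ∀ (acc : List Int) (b : Int),
    (segs.foldl (fun (st : List Int × Int) l => (st.1 ++ [st.2], st.2 + l)) (acc, b)).1
    = acc ++ prefStarts segs b := by
  induction segs with
  | nil => intro acc b; simp [prefStarts]
  | cons l t ih =>
    intro acc b
    simp only [List.foldl_cons, prefStarts]
    rw [ih]
    simp

-- one positive segment's columns: A's inner double loop equals B's slice-then-transpose when the window fits
lemma seg_eq (msa : List (List String)) (b l : Int)
    (hb : 0 ≤ b) (hlen : ∀ seq ∈ msa, b + l ≤ (seq.length : Int)) :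
    (PySem.List.pyRange 0 l 1).foldl
      (fun msaSeg i =>
        msaSeg ++ [msa.foldl (fun segCol seq => segCol ++ [PySem.List.pyGetD seq (b + i) ""]) []]) []
    = (PySem.List.pyRange 0 l 1).map
        (fun i => (msa.map (fun seq => PySem.List.slice seq (some b) (some (b + l)))).map
          (fun row => PySem.List.pyGetD row i "")) := by
  have h1 : ∀ i : Int, msa.foldl (fun segCol seq => segCol ++ [PySem.List.pyGetD seq (b + i) ""]) []
      = msa.map (fun seq => PySem.List.pyGetD seq (b + i) "") := fun i => by
    simpa using PySem.List.foldl_append_singleton_eq_map (l := msa)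
      (f := fun seq => PySem.List.pyGetD seq (b + i) "") (acc := [])
  simp only [h1]
  rw [show (fun (msaSeg : List (List String)) i =>
      msaSeg ++ [msa.map (fun seq => PySem.List.pyGetD seq (b + i) "")])
    = (fun msaSeg i => msaSeg ++ [(fun i => msa.map (fun seq => PySem.List.pyGetD seq (b + i) "")) i]) from rfl]
  rw [PySem.List.foldl_append_singleton_eq_map]
  simp only [List.nil_append]
  apply List.map_congr_left
  intro i hi
  rw [PySem.List.mem_pyRange_one] at hi
  rw [List.map_map]
  apply List.map_congr_left
  intro seq hseq
  have hS := hlen seq hseq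
  -- pyGetD seq (b+i) "" = pyGetD (slice seq b (b+l)) i ""
  simp only [Function.comp_apply]
  rw [PySem.List.slice_toNat _ hb (by omega)]
  have hib : 0 ≤ b + i := by omega
  rw [PySem.List.pyGetD_eq_getElem _ _ hib (by omega),
    PySem.List.pyGetD_eq_getElem _ _ hi.1
      (by simp [List.length_take, List.length_drop]; omega)]
  rw [List.getElem_take, List.getElem_drop]
  congr 1
  omega

-- loop invariant: from an aligned state, A's fold over segs equals B's fold over enumerate (zip …)
lemma loop_eq (msa : List (List String)) :
    ∀ (segs : List Int) (d : PySem.Dict Int (List (List String))) (sid b : Int),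
      (∀ j, (h : j < segs.length) → 0 < segs[j] →
        0 ≤ b + (segs.take j).sum ∧
        ∀ seq ∈ msa, b + (segs.take j).sum + segs[j] ≤ (seq.length : Int)) →
      (segs.foldl
        (fun (st : PySem.Dict Int (List (List String)) × Int × Int) seglen =>
          let msaSeg := (PySem.List.pyRange 0 seglen 1).foldl
            (fun msaSeg i =>
              let colIdx := st.2.2 + i
              let segCol := msa.foldl (fun segCol seq => segCol ++ [PySem.List.pyGetD seq colIdx ""]) []
              msaSeg ++ [segCol])
            []
          (st.1.insert st.2.1 msaSeg, st.2.1 + 1, st.2.2 + seglen))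
        (d, sid, b)).1 =
      (PySem.List.enumerate ((prefStarts segs b).zip segs) sid).foldl
        (fun (out : PySem.Dict Int (List (List String))) p =>
          if 0 < p.2.2 then
            out.insert p.1 ((PySem.List.pyRange 0 p.2.2 1).map
              (fun i => (msa.map (fun seq => PySem.List.slice seq (some p.2.1) (some (p.2.1 + p.2.2)))).map
                (fun row => PySem.List.pyGetD row i "")))
          else out.insert p.1 [])
        d := by
  intro segs
  induction segs with
  | nil => intro d sid b _; simp [prefStarts, PySem.List.enumerate_nil]
  | cons l rest ih =>
    intro d sid b I1
    simp only [prefStarts, List.zip_cons_cons, PySem.List.enumerate_cons, List.foldl_cons]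
    have hrest : ∀ j, (h : j < rest.length) → 0 < rest[j] →
        0 ≤ (b + l) + (rest.take j).sum ∧
        ∀ seq ∈ msa, (b + l) + (rest.take j).sum + rest[j] ≤ (seq.length : Int) := by
      intro j hj hpos
      have := I1 (j+1) (by simpa using hj) (by simpa using hpos)
      simpa [List.take_succ_cons, add_assoc] using this
    by_cases hl : 0 < l
    · have hwin := I1 0 (by simp) (by simpa using hl)
      simp only [List.take_zero, List.sum_nil, add_zero, List.getElem_cons_zero] at hwin
      rw [if_pos hl, seg_eq msa b l hwin.1 hwin.2]
      exact ih _ (sid + 1) (b + l) hrest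
    · rw [if_neg hl, PySem.List.pyRange_one_eq_nil (by omega), List.foldl_nil]
      exact ih _ (sid + 1) (b + l) hrest

-- with an empty msa both per-segment results are lists of empty columns, for ANY segment lengths
lemma loop_eq_nil :
    ∀ (segs : List Int) (d : PySem.Dict Int (List (List String))) (sid b : Int),
      (segs.foldl
        (fun (st : PySem.Dict Int (List (List String)) × Int × Int) seglen =>
          let msaSeg := (PySem.List.pyRange 0 seglen 1).foldl
            (fun msaSeg i =>
              let colIdx := st.2.2 + i
              let segCol := ([] : List (List String)).foldl (fun segCol seq => segCol ++ [PySem.List.pyGetD seq colIdx ""]) []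
              msaSeg ++ [segCol])
            []
          (st.1.insert st.2.1 msaSeg, st.2.1 + 1, st.2.2 + seglen))
        (d, sid, b)).1 =
      (PySem.List.enumerate ((prefStarts segs b).zip segs) sid).foldl
        (fun (out : PySem.Dict Int (List (List String))) p =>
          if 0 < p.2.2 then
            out.insert p.1 ((PySem.List.pyRange 0 p.2.2 1).map
              (fun i => (([] : List (List String)).map (fun seq => PySem.List.slice seq (some p.2.1) (some (p.2.1 + p.2.2)))).map
                (fun row => PySem.List.pyGetD row i "")))
          else out.insert p.1 [])
        d := by
  intro segs
  induction segs with
  | nil => intro d sid b; simp [prefStarts, PySem.List.enumerate_nil]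
  | cons l rest ih =>
    intro d sid b
    simp only [prefStarts, List.zip_cons_cons, PySem.List.enumerate_cons, List.foldl_cons]
    have hseg : (PySem.List.pyRange 0 l 1).foldl
        (fun (msaSeg : List (List String)) _ => msaSeg ++ [[]]) []
      = (PySem.List.pyRange 0 l 1).map (fun _ => ([] : List String)) := by
      exact PySem.List.foldl_append_singleton_eq_map
        (l := PySem.List.pyRange 0 l 1) (f := fun _ => ([] : List String)) (acc := [])
    by_cases hl : 0 < l
    · rw [if_pos hl]
      simp only [List.foldl_nil, List.map_nil]
      rw [hseg]
      exact ih _ (sid + 1) (b + l)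
    · rw [if_neg hl, PySem.List.pyRange_one_eq_nil (by omega), List.foldl_nil]
      exact ih _ (sid + 1) (b + l)

-- ===== VERDICT =====
theorem divide_MSA_by_segment_spec : Claim_equal_divide_MSA_by_segment := by
  intro msa segLength _hdom hpre
  unfold Spec_divide_MSA_by_segment divide_MSA_by_segment divide_MSA_by_segment_alt
  rw [startsFold]
  simp only [List.nil_append]
  rcases hpre with hnil | hI
  · subst hnil
    exact congrArg PySem.Dict.items (loop_eq_nil segLength PySem.Dict.empty 0 0)
  · exact congrArg PySem.Dict.items
      (loop_eq msa segLength PySem.Dict.empty 0 0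
        (by intro j hj hpos; simpa using hI j hj hpos))
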